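-- pv_equiv track=rewrite | github.com/omung789/FPL-Player-Points-Predictor | best_teams/best_team_no_transfers.py | get_formation
-- ===== SOURCE A (Python) =====
-- def get_formation(team):
--     positions = {"DEF": 0, "MID": 0, "FWD": 0}
--     for player in team:
--         if player[2] == "DEF":
--             positions["DEF"] += 1
--         elif player[2] == "MID":
--             positions["MID"] += 1
--         elif player[2] == "FWD":
--             positions["FWD"] += 1
--     return str(positions["DEF"]) +  str(positions["MID"]) + str(positions["FWD"])
-- ===== SOURCE B (Python) =====
-- def get_formation(team):
--     d = sum(1 for p in team if p[2] == "DEF")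
--     m = sum(1 for p in team if p[2] == "MID")
--     f = sum(1 for p in team if p[2] == "FWD")
--     return str(d) + str(m) + str(f)
-- ===== Notes on version B (the rewrite author's own statement) =====
-- stated objective: simpler
-- what changed: Replaces the single dict-accumulating loop over branching updates with three independent one-predicate scans (sum of a generator per position) and concatenates their counts.
import Mathlib
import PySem

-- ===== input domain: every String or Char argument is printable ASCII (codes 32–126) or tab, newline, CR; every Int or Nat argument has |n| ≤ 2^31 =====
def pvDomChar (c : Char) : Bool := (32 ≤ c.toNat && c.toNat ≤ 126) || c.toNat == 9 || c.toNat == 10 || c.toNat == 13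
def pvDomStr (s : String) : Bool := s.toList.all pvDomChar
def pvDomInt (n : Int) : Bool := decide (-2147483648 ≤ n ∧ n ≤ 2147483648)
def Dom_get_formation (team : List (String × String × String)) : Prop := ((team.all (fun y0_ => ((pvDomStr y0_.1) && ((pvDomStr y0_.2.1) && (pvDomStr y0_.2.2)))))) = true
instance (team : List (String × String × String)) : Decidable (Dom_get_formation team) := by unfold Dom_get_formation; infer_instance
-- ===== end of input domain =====

-- Header: B replaces A's single dict-accumulating loop with three independent per-position scans (objective: simpler).
-- ===== PORT A =====
def pvStepA (d : PySem.Dict String Int) (player : String × String × String) : PySem.Dict String Int :=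
  if player.2.2 == "DEF" then d.insert "DEF" (d.getD "DEF" 0 + 1)
  else if player.2.2 == "MID" then d.insert "MID" (d.getD "MID" 0 + 1)
  else if player.2.2 == "FWD" then d.insert "FWD" (d.getD "FWD" 0 + 1)
  else d

def get_formation (team : List (String × String × String)) : String :=
  let positions : PySem.Dict String Int :=
    ((PySem.Dict.empty.insert "DEF" 0).insert "MID" 0).insert "FWD" 0
  let positions := team.foldl pvStepA positions
  PySem.Int.toStr (positions.getD "DEF" 0) ++ PySem.Int.toStr (positions.getD "MID" 0)
    ++ PySem.Int.toStr (positions.getD "FWD" 0)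

-- ===== PORT B =====
def get_formation_alt (team : List (String × String × String)) : String :=
  let d : Int := (team.countP (fun p => p.2.2 == "DEF") : Int)
  let m : Int := (team.countP (fun p => p.2.2 == "MID") : Int)
  let f : Int := (team.countP (fun p => p.2.2 == "FWD") : Int)
  PySem.Int.toStr d ++ PySem.Int.toStr m ++ PySem.Int.toStr f

-- ===== PRECONDITION & SPEC =====
def Spec_get_formation (team : List (String × String × String)) (out : String) : Prop := out = get_formation_alt team
instance (team : List (String × String × String)) (out : String) : Decidable (Spec_get_formation team out) := by unfold Spec_get_formation; infer_instance

-- ===== CLAIM (what is proved, stated in full; the proofs are below) =====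
def Claim_equal_get_formation : Prop := ∀ (team : List (String × String × String)), Dom_get_formation team → Spec_get_formation team (get_formation team)

-- ===== LEMMAS AND PROOFS =====
theorem pvFold_getD (team : List (String × String × String)) (d : PySem.Dict String Int)
    (k : String) (hk : k = "DEF" ∨ k = "MID" ∨ k = "FWD") :
    (team.foldl pvStepA d).getD k 0 = d.getD k 0 + (team.countP (fun p => p.2.2 == k) : Int) := by
  induction team generalizing d with
  | nil => simp
  | cons p t ih =>
    simp only [List.foldl_cons, List.countP_cons]
    rw [ih]
    unfold pvStepA
    by_cases h1 : p.2.2 = "DEF"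
    · simp [h1, PySem.Dict.getD_insert]
      rcases hk with rfl | rfl | rfl <;> simp <;> omega
    · by_cases h2 : p.2.2 = "MID"
      · simp [h1, h2, PySem.Dict.getD_insert]
        rcases hk with rfl | rfl | rfl <;> simp [h1] <;> omega
      · by_cases h3 : p.2.2 = "FWD"
        · simp [h1, h2, h3, PySem.Dict.getD_insert]
          rcases hk with rfl | rfl | rfl <;> simp [h1, h2] <;> omega
        · have : (p.2.2 == k) = false := by
            rcases hk with rfl | rfl | rfl <;> simp [h1, h2, h3]
          simp [h1, h2, h3, this]

-- ===== VERDICT (by name: the statement is the Claim_ definition above) =====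
theorem get_formation_spec : Claim_equal_get_formation := by
  intro team _
  show get_formation team = get_formation_alt team
  simp only [get_formation, get_formation_alt]
  rw [pvFold_getD _ _ _ (Or.inl rfl), pvFold_getD _ _ _ (Or.inr (Or.inl rfl)),
      pvFold_getD _ _ _ (Or.inr (Or.inr rfl))]
  simp [PySem.Dict.getD_insert]
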